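-- pv_equiv track=rewrite | github.com/metonline/mgbric | fix_hands_from_lin_correct.py | calculate_fourth_hand
-- ===== SOURCE A (Python) =====
-- def calculate_fourth_hand(n_hand, e_hand, s_hand, dealer):
--     """
--     Calculate the 4th hand from remaining 52 cards
--     Based on which hand is missing
--     """
--     # Map all 52 cards
--     suits = ['S', 'H', 'D', 'C']
--     ranks = ['A', 'K', 'Q', 'J', 'T', '9', '8', '7', '6', '5', '4', '3', '2']
--
--     all_cards = set()
--     for suit in suits:
--         for rank in ranks:
--             all_cards.add(rank + suit)
--
--     # Parse the 3 hands and remove their cards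
--     for hand_pbn in [n_hand, e_hand, s_hand]:
--         parts = hand_pbn.split('.')
--         for suit_idx, suit in enumerate(suits):
--             cards = parts[suit_idx] if suit_idx < len(parts) else ''
--             for card in cards:
--                 all_cards.discard(card + suit)
--
--     # Organize remaining cards by suit
--     remaining = {'S': '', 'H': '', 'D': '', 'C': ''}
--     for card in sorted(all_cards, key=lambda x: (ranks.index(x[0]))):
--         remaining[card[1]] += card[0]
--
--     # Return in PBN format (S.H.D.C)
--     return f"{remaining['S']}.{remaining['H']}.{remaining['D']}.{remaining['C']}"
-- ===== SOURCE B (Python) =====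
-- def calculate_fourth_hand(n_hand, e_hand, s_hand, dealer):
--     """Fourth hand = per-suit set difference against the canonical rank order."""
--     RANKS = "AKQJT98765432"
--     hands = [n_hand.split('.'), e_hand.split('.'), s_hand.split('.')]
--     segs = []
--     for i in range(4):
--         used = set()
--         for parts in hands:
--             if i < len(parts):
--                 used.update(parts[i])
--         segs.append(''.join(r for r in RANKS if r not in used))
--     return '.'.join(segs)
-- ===== Notes on version B (the rewrite author's own statement) =====
-- stated objective: simpler
-- what changed: B drops A's global 52-card set, the rank-keyed sort and the suit dictionary: it computes each suit segment independently as a set-difference filter of the canonical rank string against the ranks the three hands use in that suit.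
import Mathlib
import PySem

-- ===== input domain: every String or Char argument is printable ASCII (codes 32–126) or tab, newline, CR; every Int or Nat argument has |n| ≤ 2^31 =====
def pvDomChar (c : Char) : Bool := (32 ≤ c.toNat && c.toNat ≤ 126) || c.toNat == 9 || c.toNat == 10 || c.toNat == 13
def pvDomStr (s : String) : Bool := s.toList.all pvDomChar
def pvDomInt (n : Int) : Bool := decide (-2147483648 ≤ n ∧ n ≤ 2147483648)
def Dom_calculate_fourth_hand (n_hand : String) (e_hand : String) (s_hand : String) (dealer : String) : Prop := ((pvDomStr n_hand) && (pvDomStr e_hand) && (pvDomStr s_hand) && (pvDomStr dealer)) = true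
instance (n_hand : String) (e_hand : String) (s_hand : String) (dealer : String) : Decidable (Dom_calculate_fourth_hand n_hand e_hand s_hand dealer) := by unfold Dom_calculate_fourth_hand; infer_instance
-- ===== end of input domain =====

-- B computes each suit segment independently as a set-difference filter over the canonical
-- rank order, replacing A's global 52-card set, rank-keyed sort and suit dictionary (objective: simpler).
-- Cards are modelled as 2-char `List Char` (Python's rank+suit string concatenation).
-- A's `sorted(all_cards, key=rank)` iterates a Python set; its tie order (same rank, different
-- suit) does not affect the returned string, which only groups by suit, so the port's
-- insertion-ordered PySem.Set is exact for the RESULT.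

-- ===== PORT A =====
-- `ranks.index(x[0])` and `x[0]`/`x[1]`/`remaining[card[1]]` never raise: every card in the set
-- is [rank, suit] with rank ∈ ranks and suit ∈ suits, so the `.getD` defaults are never taken.
def calculate_fourth_hand (n_hand : String) (e_hand : String) (s_hand : String) (dealer : String) : String :=
  let suits : List Char := ['S', 'H', 'D', 'C']
  let ranks : List Char := ['A', 'K', 'Q', 'J', 'T', '9', '8', '7', '6', '5', '4', '3', '2']
  let all_cards : PySem.Set (List Char) :=
    suits.foldl (fun ac suit =>
      ranks.foldl (fun ac rank => PySem.Set.add ac ([rank] ++ [suit])) ac) PySem.Set.empty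
  let all_cards :=
    [n_hand, e_hand, s_hand].foldl (fun ac hand_pbn =>
      let parts := (PySem.Str.split? hand_pbn ".").getD []
      (PySem.List.enumerate suits).foldl (fun ac si =>
        let cards : List Char :=
          if si.1 < (parts.length : Int) then ((PySem.List.pyGet? parts si.1).getD "").toList else []
        cards.foldl (fun ac card => PySem.Set.discard ac ([card] ++ [si.2])) ac) ac) all_cards
  let sortedCards := PySem.List.sorted all_cards
      (fun x => (PySem.List.index? ranks ((PySem.List.pyGet? x 0).getD ' ')).getD 0) false
  let remaining : PySem.Dict Char (List Char) :=
    PySem.Dict.ofList [('S', []), ('H', []), ('D', []), ('C', [])]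
  let remaining := sortedCards.foldl (fun d card =>
      PySem.Dict.modify d ((PySem.List.pyGet? card 1).getD ' ') []
        (fun v => v ++ [(PySem.List.pyGet? card 0).getD ' '])) remaining
  String.ofList (remaining.getD 'S' [] ++ ['.'] ++ remaining.getD 'H' [] ++ ['.'] ++
                 remaining.getD 'D' [] ++ ['.'] ++ remaining.getD 'C' [])


-- ===== PORT B =====
def calculate_fourth_hand_alt (n_hand : String) (e_hand : String) (s_hand : String) (dealer : String) : String :=
  let RANKS : List Char := "AKQJT98765432".toList
  let hands : List (List String) :=
    [(PySem.Str.split? n_hand ".").getD [], (PySem.Str.split? e_hand ".").getD [],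
     (PySem.Str.split? s_hand ".").getD []]
  let segs : List (List Char) := (List.range 4).map (fun i =>
    let used : PySem.Set Char :=
      hands.foldl (fun u parts =>
        if i < parts.length then PySem.Set.update u (parts.getD i "").toList else u)
        PySem.Set.empty
    RANKS.filter (fun r => !(PySem.Set.contains used r)))
  String.ofList (PySem.Chars.join ['.'] segs)

-- ===== PRECONDITION & SPEC =====
-- A is total on its domain (no Pre_): split('.') never raises, missing segments are '', and
-- every lookup above is on a key that is present.
def Spec_calculate_fourth_hand (n_hand : String) (e_hand : String) (s_hand : String) (dealer : String) (out : String) : Prop := out = calculate_fourth_hand_alt n_hand e_hand s_hand dealer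
instance (n_hand : String) (e_hand : String) (s_hand : String) (dealer : String) (out : String) : Decidable (Spec_calculate_fourth_hand n_hand e_hand s_hand dealer out) := by unfold Spec_calculate_fourth_hand; infer_instance

-- ===== CLAIM (what is proved, stated in full; the proofs are below) =====
def Claim_equal_calculate_fourth_hand : Prop := ∀ (n_hand : String) (e_hand : String) (s_hand : String) (dealer : String), Dom_calculate_fourth_hand n_hand e_hand s_hand dealer → Spec_calculate_fourth_hand n_hand e_hand s_hand dealer (calculate_fourth_hand n_hand e_hand s_hand dealer)

-- ===== LEMMAS AND PROOFS =====
theorem foldl_discard_eq_filter {α β : Type} [BEq α] (f : β → α) (cs : List β) (S : List α) :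
    cs.foldl (fun ac c => PySem.Set.discard ac (f c)) S
      = S.filter (fun y => cs.all (fun c => !(y == f c))) := by
  induction cs generalizing S with
  | nil => simp
  | cons c cs ih =>
      rw [List.foldl_cons, ih]
      simp only [PySem.Set.discard, List.filter_filter, List.all_cons]
      exact List.filter_congr (fun y _ => Bool.and_comm _ _)

theorem foldl_modify_append {κ ν α : Type} [BEq κ] [LawfulBEq κ] [DecidableEq κ]
    (l : List α) (d : PySem.Dict κ (List ν)) (kf : α → κ) (vf : α → ν) (k : κ) :
    PySem.Dict.getD (l.foldl (fun d x => PySem.Dict.modify d (kf x) [] (fun v => v ++ [vf x])) d) k []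
      = PySem.Dict.getD d k [] ++ (l.filter (fun x => kf x == k)).map vf := by
  induction l generalizing d with
  | nil => simp
  | cons x l ih =>
      rw [List.foldl_cons, ih]
      by_cases h : kf x = k
      · simp [PySem.Dict.modify, h]
      · simp [PySem.Dict.modify, PySem.Dict.getD_insert, h, Ne.symm h]

theorem filter_sorted_eq {α κ : Type} [LinearOrder κ] (xs : List α) (key : α → κ) (p : α → Bool)
    (h : (xs.filter p).Pairwise (fun a b => key a < key b)) :
    (PySem.List.sorted xs key false).filter p = xs.filter p := by
  have hperm : ((PySem.List.sorted xs key false).filter p).Perm (xs.filter p) :=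
    (PySem.List.sorted_perm xs key false).filter p
  have hle : ((PySem.List.sorted xs key false).filter p).Pairwise (fun a b => key a ≤ key b) :=
    List.Pairwise.sublist List.filter_sublist (PySem.List.sorted_pairwise xs key)
  have hnd : ((xs.filter p).map key).Nodup :=
    List.Pairwise.map key (fun a b hab => ne_of_lt hab) h
  have hnd' : (((PySem.List.sorted xs key false).filter p).map key).Nodup :=
    ((hperm.map key).nodup_iff).mpr hnd
  have hne := List.pairwise_map.mp hnd'
  have hlt : ((PySem.List.sorted xs key false).filter p).Pairwise (fun a b => key a < key b) :=
    (hle.and hne).imp (fun ⟨hle', hne'⟩ => lt_of_le_of_ne hle' hne')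
  exact hperm.eq_of_pairwise (fun a b _ _ h1 h2 => absurd h2 (not_lt_of_gt h1)) hlt h

def pvRanks : List Char := ['A', 'K', 'Q', 'J', 'T', '9', '8', '7', '6', '5', '4', '3', '2']
def pvUsed (p : List String) (i : Nat) : List Char := (p.getD i "").toList
def pvSeg (p0 p1 p2 : List String) (i : Nat) : List Char :=
  pvRanks.filter (fun r => !((pvUsed p0 i ++ pvUsed p1 i ++ pvUsed p2 i).contains r))

-- guard lemma (B side)
theorem update_guard (u : PySem.Set Char) (parts : List String) (i : Nat) :
    (if i < parts.length then PySem.Set.update u (parts.getD i "").toList else u)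
      = PySem.Set.update u (pvUsed parts i) := by
  split_ifs with h
  · rfl
  · rw [pvUsed, List.getD_eq_default _ _ (by omega)]
    rfl

theorem contains_update3 (u0 u1 u2 : List Char) (r : Char) :
    PySem.Set.contains (PySem.Set.update (PySem.Set.update (PySem.Set.update PySem.Set.empty u0) u1) u2) r
      = (u0 ++ u1 ++ u2).contains r := by
  rw [Bool.eq_iff_iff]
  simp [PySem.Set.mem_update, PySem.Set.empty]
  tauto

-- guard lemma (A side)
theorem cards_eq (parts : List String) (i : Nat) :
    (if (i : Int) < (parts.length : Int) then ((PySem.List.pyGet? parts (i : Int)).getD "").toList else [])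
      = pvUsed parts i := by
  by_cases h : i < parts.length
  · simp [pvUsed, h, List.getD]
  · have : ¬ ((i : Int) < (parts.length : Int)) := by exact_mod_cast h
    rw [if_neg this, pvUsed, List.getD_eq_default _ _ (by omega)]
    rfl

def pvOut (p0 p1 p2 : List String) : String :=
  String.ofList (PySem.Chars.join ['.'] [pvSeg p0 p1 p2 0, pvSeg p0 p1 p2 1, pvSeg p0 p1 p2 2, pvSeg p0 p1 p2 3])

theorem alt_eq (n_hand e_hand s_hand dealer : String) :
    calculate_fourth_hand_alt n_hand e_hand s_hand dealer
      = pvOut ((PySem.Str.split? n_hand ".").getD []) ((PySem.Str.split? e_hand ".").getD [])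
          ((PySem.Str.split? s_hand ".").getD []) := by
  unfold calculate_fourth_hand_alt pvOut
  simp only [show List.range 4 = [0, 1, 2, 3] from rfl, List.map_cons, List.map_nil,
    List.foldl_cons, List.foldl_nil, update_guard, contains_update3]
  simp [pvSeg, pvRanks]

def pvChunk (s : Char) : List (List Char) := pvRanks.map (fun r => [r, s])

theorem chunk_extract_S (Q : List Char → Bool) :
    ((pvChunk 'S' ++ pvChunk 'H' ++ pvChunk 'D' ++ pvChunk 'C').filter Q).filter
        (fun y => ((PySem.List.pyGet? y 1).getD ' ') == 'S')
      = (pvRanks.filter (fun r => Q [r, 'S'])).map (fun r => [r, 'S']) := by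
  simp only [pvChunk, List.filter_append, List.filter_filter, List.filter_map]
  simp

theorem chunk_extract_H (Q : List Char → Bool) :
    ((pvChunk 'S' ++ pvChunk 'H' ++ pvChunk 'D' ++ pvChunk 'C').filter Q).filter
        (fun y => ((PySem.List.pyGet? y 1).getD ' ') == 'H')
      = (pvRanks.filter (fun r => Q [r, 'H'])).map (fun r => [r, 'H']) := by
  simp only [pvChunk, List.filter_append, List.filter_filter, List.filter_map]
  simp

theorem chunk_extract_D (Q : List Char → Bool) :
    ((pvChunk 'S' ++ pvChunk 'H' ++ pvChunk 'D' ++ pvChunk 'C').filter Q).filter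
        (fun y => ((PySem.List.pyGet? y 1).getD ' ') == 'D')
      = (pvRanks.filter (fun r => Q [r, 'D'])).map (fun r => [r, 'D']) := by
  simp only [pvChunk, List.filter_append, List.filter_filter, List.filter_map]
  simp

theorem chunk_extract_C (Q : List Char → Bool) :
    ((pvChunk 'S' ++ pvChunk 'H' ++ pvChunk 'D' ++ pvChunk 'C').filter Q).filter
        (fun y => ((PySem.List.pyGet? y 1).getD ' ') == 'C')
      = (pvRanks.filter (fun r => Q [r, 'C'])).map (fun r => [r, 'C']) := by
  simp only [pvChunk, List.filter_append, List.filter_filter, List.filter_map]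
  simp

theorem chunk_pairwise (P : Char → Bool) (s : Char) :
    ((pvRanks.filter P).map (fun r => [r, s])).Pairwise (fun a b =>
      ((PySem.List.index? pvRanks ((PySem.List.pyGet? a 0).getD ' ')).getD 0) <
      ((PySem.List.index? pvRanks ((PySem.List.pyGet? b 0).getD ' ')).getD 0)) := by
  rw [List.pairwise_map]
  have base : pvRanks.Pairwise (fun a b =>
      ((PySem.List.index? pvRanks a).getD 0) < ((PySem.List.index? pvRanks b).getD 0)) := by decide
  exact (List.Pairwise.sublist List.filter_sublist base).imp (fun {a b} h => by simpa using h)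

theorem seg_final_S (Q : List Char → Bool) :
    (List.map (fun card => (PySem.List.pyGet? card 0).getD ' ')
        (List.filter (fun y => ((PySem.List.pyGet? y 1).getD ' ') == 'S')
          (PySem.List.sorted ((pvChunk 'S' ++ pvChunk 'H' ++ pvChunk 'D' ++ pvChunk 'C').filter Q)
            (fun x => (PySem.List.index? pvRanks ((PySem.List.pyGet? x 0).getD ' ')).getD 0) false)))
      = pvRanks.filter (fun r => Q [r, 'S']) := by
  rw [filter_sorted_eq _ _ _ (by rw [chunk_extract_S]; exact chunk_pairwise _ 'S'),
    chunk_extract_S, List.map_map]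
  rw [show ((fun card => (PySem.List.pyGet? card 0).getD ' ') ∘ fun r => [r, 'S']) = id from
    funext fun r => rfl, List.map_id]

theorem seg_final_H (Q : List Char → Bool) :
    (List.map (fun card => (PySem.List.pyGet? card 0).getD ' ')
        (List.filter (fun y => ((PySem.List.pyGet? y 1).getD ' ') == 'H')
          (PySem.List.sorted ((pvChunk 'S' ++ pvChunk 'H' ++ pvChunk 'D' ++ pvChunk 'C').filter Q)
            (fun x => (PySem.List.index? pvRanks ((PySem.List.pyGet? x 0).getD ' ')).getD 0) false)))
      = pvRanks.filter (fun r => Q [r, 'H']) := by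
  rw [filter_sorted_eq _ _ _ (by rw [chunk_extract_H]; exact chunk_pairwise _ 'H'),
    chunk_extract_H, List.map_map]
  rw [show ((fun card => (PySem.List.pyGet? card 0).getD ' ') ∘ fun r => [r, 'H']) = id from
    funext fun r => rfl, List.map_id]

theorem seg_final_D (Q : List Char → Bool) :
    (List.map (fun card => (PySem.List.pyGet? card 0).getD ' ')
        (List.filter (fun y => ((PySem.List.pyGet? y 1).getD ' ') == 'D')
          (PySem.List.sorted ((pvChunk 'S' ++ pvChunk 'H' ++ pvChunk 'D' ++ pvChunk 'C').filter Q)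
            (fun x => (PySem.List.index? pvRanks ((PySem.List.pyGet? x 0).getD ' ')).getD 0) false)))
      = pvRanks.filter (fun r => Q [r, 'D']) := by
  rw [filter_sorted_eq _ _ _ (by rw [chunk_extract_D]; exact chunk_pairwise _ 'D'),
    chunk_extract_D, List.map_map]
  rw [show ((fun card => (PySem.List.pyGet? card 0).getD ' ') ∘ fun r => [r, 'D']) = id from
    funext fun r => rfl, List.map_id]

theorem seg_final_C (Q : List Char → Bool) :
    (List.map (fun card => (PySem.List.pyGet? card 0).getD ' ')
        (List.filter (fun y => ((PySem.List.pyGet? y 1).getD ' ') == 'C')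
          (PySem.List.sorted ((pvChunk 'S' ++ pvChunk 'H' ++ pvChunk 'D' ++ pvChunk 'C').filter Q)
            (fun x => (PySem.List.index? pvRanks ((PySem.List.pyGet? x 0).getD ' ')).getD 0) false)))
      = pvRanks.filter (fun r => Q [r, 'C']) := by
  rw [filter_sorted_eq _ _ _ (by rw [chunk_extract_C]; exact chunk_pairwise _ 'C'),
    chunk_extract_C, List.map_map]
  rw [show ((fun card => (PySem.List.pyGet? card 0).getD ' ') ∘ fun r => [r, 'C']) = id from
    funext fun r => rfl, List.map_id]

theorem cards_eq0 (parts : List String) :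
    (if (0:Int) < (parts.length : Int) then ((PySem.List.pyGet? parts (0:Int)).getD "").toList else []) = pvUsed parts 0 := by
  exact_mod_cast cards_eq parts 0
theorem cards_eq1 (parts : List String) :
    (if (1:Int) < (parts.length : Int) then ((PySem.List.pyGet? parts (1:Int)).getD "").toList else []) = pvUsed parts 1 := by
  exact_mod_cast cards_eq parts 1
theorem cards_eq2 (parts : List String) :
    (if (2:Int) < (parts.length : Int) then ((PySem.List.pyGet? parts (2:Int)).getD "").toList else []) = pvUsed parts 2 := by
  exact_mod_cast cards_eq parts 2
theorem cards_eq3 (parts : List String) :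
    (if (3:Int) < (parts.length : Int) then ((PySem.List.pyGet? parts (3:Int)).getD "").toList else []) = pvUsed parts 3 := by
  exact_mod_cast cards_eq parts 3

theorem assemble (p0 p1 p2 : List String) (P0 P1 P2 P3 : Char → Bool)
    (h0 : ∀ r ∈ pvRanks, P0 r = !((pvUsed p0 0 ++ pvUsed p1 0 ++ pvUsed p2 0).contains r))
    (h1 : ∀ r ∈ pvRanks, P1 r = !((pvUsed p0 1 ++ pvUsed p1 1 ++ pvUsed p2 1).contains r))
    (h2 : ∀ r ∈ pvRanks, P2 r = !((pvUsed p0 2 ++ pvUsed p1 2 ++ pvUsed p2 2).contains r))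
    (h3 : ∀ r ∈ pvRanks, P3 r = !((pvUsed p0 3 ++ pvUsed p1 3 ++ pvUsed p2 3).contains r)) :
    String.ofList (pvRanks.filter P0 ++ ['.'] ++ pvRanks.filter P1 ++ ['.'] ++
        pvRanks.filter P2 ++ ['.'] ++ pvRanks.filter P3) = pvOut p0 p1 p2 := by
  unfold pvOut pvSeg
  rw [List.filter_congr h0, List.filter_congr h1, List.filter_congr h2, List.filter_congr h3]
  simp [PySem.Chars.join, List.intercalate, List.intersperse]

set_option maxRecDepth 8192 in
set_option maxHeartbeats 2000000 in
theorem a_eq (n_hand e_hand s_hand dealer : String) :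
    calculate_fourth_hand n_hand e_hand s_hand dealer
      = pvOut ((PySem.Str.split? n_hand ".").getD []) ((PySem.Str.split? e_hand ".").getD [])
          ((PySem.Str.split? s_hand ".").getD []) := by
  have hinit : List.foldl (fun (ac : PySem.Set (List Char)) suit =>
      List.foldl (fun ac rank => PySem.Set.add ac ([rank] ++ [suit])) ac
        ['A', 'K', 'Q', 'J', 'T', '9', '8', '7', '6', '5', '4', '3', '2']) PySem.Set.empty
      ['S', 'H', 'D', 'C'] = pvChunk 'S' ++ pvChunk 'H' ++ pvChunk 'D' ++ pvChunk 'C' := by decide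
  unfold calculate_fourth_hand
  simp only [hinit]
  simp only [show ['A', 'K', 'Q', 'J', 'T', '9', '8', '7', '6', '5', '4', '3', '2'] = pvRanks from rfl]
  simp only [show PySem.List.enumerate ['S','H','D','C'] = [((0:Int),'S'), (1,'H'), (2,'D'), (3,'C')] from rfl,
    List.foldl_cons, List.foldl_nil, List.singleton_append]
  simp only [cards_eq0, cards_eq1, cards_eq2, cards_eq3, foldl_discard_eq_filter, List.filter_filter]
  simp only [foldl_modify_append]
  simp only [show PySem.Dict.getD (PySem.Dict.ofList [('S',([]:List Char)),('H',[]),('D',[]),('C',[])]) 'S' [] = [] from rfl,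
    show PySem.Dict.getD (PySem.Dict.ofList [('S',([]:List Char)),('H',[]),('D',[]),('C',[])]) 'H' [] = [] from rfl,
    show PySem.Dict.getD (PySem.Dict.ofList [('S',([]:List Char)),('H',[]),('D',[]),('C',[])]) 'D' [] = [] from rfl,
    show PySem.Dict.getD (PySem.Dict.ofList [('S',([]:List Char)),('H',[]),('D',[]),('C',[])]) 'C' [] = [] from rfl,
    List.nil_append]
  simp only [seg_final_S, seg_final_H, seg_final_D, seg_final_C]
  apply assemble
  all_goals intro r _
  all_goals rw [Bool.eq_iff_iff]
  all_goals simp [pvUsed, List.all_eq_true]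
  all_goals aesop


-- ===== VERDICT (by name: the statement is the Claim_ definition above) =====
theorem calculate_fourth_hand_spec : Claim_equal_calculate_fourth_hand := by
  intro n_hand e_hand s_hand dealer _
  unfold Spec_calculate_fourth_hand
  rw [a_eq, alt_eq]
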